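-- pv_equiv track=rewrite | github.com/edithbeen/CareerCup | Q11_String_Replacement_with_Given_Map.py | find_mapping
-- ===== SOURCE A (Python) =====
-- m = {'f':['M', '8'], 'b':['4', 'c', 't']}
--
-- def find_mapping(s):
--     l = []
--     for i in range(len(s)):
--         temp = [s[i]]
--         if m.get(s[i]) is not None:
--             temp += m[s[i]]
--         if len(l) == 0:
--             l = temp
--         else:
--             new_l = l
--             l = []
--             for x in new_l:
--                 for y in temp:
--                     l += [x+y]
--     return l
-- ===== SOURCE B (Python) =====
-- m = {'f': ['M', '8'], 'b': ['4', 'c', 't']}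
--
-- def find_mapping(s):
--     if not s:
--         return []
--     opts = [[c] + m.get(c, []) for c in s]
--     total = 1
--     for o in opts:
--         total *= len(o)
--
--     def decode(os, k):
--         if not os:
--             return ''
--         t = 1
--         for o in os[1:]:
--             t *= len(o)
--         return os[0][k // t] + decode(os[1:], k % t)
--
--     return [decode(opts, k) for k in range(total)]
-- ===== Notes on version B (the rewrite author's own statement) =====
-- stated objective: alternative
-- what changed: B counts the total number of results and decodes each index k into one per-character choice by mixed-radix div/mod, instead of A's incremental cross-product accumulator loop that rebuilds the whole list at every character.
import Mathlib
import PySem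

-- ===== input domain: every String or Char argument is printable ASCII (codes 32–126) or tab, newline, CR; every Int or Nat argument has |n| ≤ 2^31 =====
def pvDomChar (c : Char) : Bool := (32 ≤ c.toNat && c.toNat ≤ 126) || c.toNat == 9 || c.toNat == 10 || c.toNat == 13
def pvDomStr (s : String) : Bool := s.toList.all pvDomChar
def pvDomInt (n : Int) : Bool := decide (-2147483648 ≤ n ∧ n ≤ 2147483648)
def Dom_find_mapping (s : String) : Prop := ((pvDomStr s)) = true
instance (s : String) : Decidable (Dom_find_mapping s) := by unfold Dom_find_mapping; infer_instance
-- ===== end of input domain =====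

-- B enumerates the results by mixed-radix counting — total count, then each index k decoded
-- into one choice per character by div/mod — instead of A's incremental cross-product
-- accumulator loop (objective: alternative).

-- the module-level dict m, shared context of both programs
def mDict : PySem.Dict Char (List String) :=
  PySem.Dict.ofList [('f', ["M", "8"]), ('b', ["4", "c", "t"])]

-- ===== PORT A =====
def find_mapping (s : String) : List String :=
  s.toList.foldl (fun l c =>
    let temp0 := [String.ofList [c]]
    let temp := match mDict.get? c with
      | some v => temp0 ++ v
      | none => temp0
    if l.length = 0 then temp
    else
      -- new_l = l; l = []; for x in new_l: for y in temp: l += [x+y]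
      l.foldl (fun acc x => temp.foldl (fun acc2 y => acc2 ++ [x ++ y]) acc) []) []

-- ===== PORT B =====
-- options row for one character: [c] + m.get(c, [])
def pvOptions (c : Char) : List String :=
  [String.ofList [c]] ++ (mDict.get? c).getD []

-- total = 1; for o in opts: total *= len(o)
def pvTotal (os : List (List String)) : Nat :=
  os.foldl (fun t o => t * o.length) 1

-- decode(os, k): pick os[0][k // t] where t = product of the remaining rows' lengths, recurse.
-- os[0][k // t] is ported by pyGet? (exact for Python indexing) with getD "" to stay total;
-- every index actually reached satisfies k < pvTotal os, so the default is never taken.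
def pvDecode : List (List String) → Nat → String
  | [], _ => ""
  | o :: rest, k =>
      let t := pvTotal rest
      ((PySem.List.pyGet? o ((k / t : Nat) : Int)).getD "") ++ pvDecode rest (k % t)

def find_mapping_alt (s : String) : List String :=
  if s.toList.isEmpty then []
  else
    let opts := s.toList.map pvOptions
    (List.range (pvTotal opts)).map (pvDecode opts)

-- ===== PRECONDITION & SPEC =====
def Spec_find_mapping (s : String) (out : List String) : Prop := out = find_mapping_alt s
instance (s : String) (out : List String) : Decidable (Spec_find_mapping s out) := by unfold Spec_find_mapping; infer_instance

-- ===== CLAIM (what is proved, stated in full; the proofs are below) =====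
def Claim_equal_find_mapping : Prop := ∀ (s : String), Dom_find_mapping s → Spec_find_mapping s (find_mapping s)

-- ===== LEMMAS AND PROOFS =====

-- common normal form both programs reduce to: the cartesian product, rightmost factor fastest
def pvProduct : List (List String) → List String
  | [] => [""]
  | t :: rest => t.flatMap (fun x => (pvProduct rest).map (fun p => x ++ p))

theorem pvOptions_ne_nil (c : Char) : pvOptions c ≠ [] := by
  simp [pvOptions]

-- ---- A's side: the accumulator loop computes the cartesian product ----

-- A's temp computation equals B's options row
theorem tempA_eq_options (c : Char) :
    (match mDict.get? c with
      | some v => [String.ofList [c]] ++ v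
      | none => [String.ofList [c]]) = pvOptions c := by
  unfold pvOptions
  cases mDict.get? c <;> simp

-- the inner double loop is a flatMap
theorem inner_loop_eq_flatMap (l temp : List String) :
    l.foldl (fun acc x => temp.foldl (fun acc2 y => acc2 ++ [x ++ y]) acc) [] =
      l.flatMap (fun x => temp.map (fun y => x ++ y)) := by
  simp only [PySem.List.foldl_append_singleton_eq_map]
  exact PySem.List.foldl_append_eq_flatMap (fun x => temp.map (fun y => x ++ y)) l []
    |>.trans (by simp)

-- loop invariant: once the accumulator is nonempty, A's fold computes the
-- cross product of the accumulator with the product of the remaining rows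
theorem foldA_eq_product (cs : List Char) :
    ∀ acc : List String, acc ≠ [] →
      cs.foldl (fun l c =>
        let temp0 := [String.ofList [c]]
        let temp := match mDict.get? c with
          | some v => temp0 ++ v
          | none => temp0
        if l.length = 0 then temp
        else l.foldl (fun acc x => temp.foldl (fun acc2 y => acc2 ++ [x ++ y]) acc) []) acc =
      acc.flatMap (fun x => (pvProduct (cs.map pvOptions)).map (fun p => x ++ p)) := by
  induction cs with
  | nil =>
    intro acc _
    simp [pvProduct]
  | cons c cs ih =>
    intro acc hacc
    rw [List.foldl_cons]
    have hstep : (let temp0 := [String.ofList [c]]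
        let temp := match mDict.get? c with
          | some v => temp0 ++ v
          | none => temp0
        if acc.length = 0 then temp
        else acc.foldl (fun a x => temp.foldl (fun acc2 y => acc2 ++ [x ++ y]) a) []) =
        acc.flatMap (fun x => (pvOptions c).map (fun y => x ++ y)) := by
      have hl : acc.length ≠ 0 := by simpa using hacc
      simp only [if_neg hl, inner_loop_eq_flatMap, tempA_eq_options]
    rw [hstep]
    have hne : acc.flatMap (fun x => (pvOptions c).map (fun y => x ++ y)) ≠ [] := by
      cases acc with
      | nil => exact absurd rfl hacc
      | cons a as =>
        have := pvOptions_ne_nil c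
        cases h : pvOptions c with
        | nil => exact absurd h this
        | cons b bs => simp
    rw [ih _ hne]
    simp only [List.map_cons, pvProduct, List.flatMap_assoc, List.map_flatMap, List.flatMap_map,
      List.map_map, Function.comp_def]
    simp [String.append_assoc]

-- ---- B's side: mixed-radix enumeration computes the cartesian product ----

theorem pvTotal_aux (os : List (List String)) :
    ∀ a : Nat, os.foldl (fun t o => t * o.length) a = a * pvTotal os := by
  induction os with
  | nil => intro a; simp [pvTotal]
  | cons o rest ih =>
    intro a
    simp only [List.foldl_cons, pvTotal]
    rw [ih (a * o.length), ih (1 * o.length)]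
    ring

theorem pvTotal_cons (o : List String) (rest : List (List String)) :
    pvTotal (o :: rest) = o.length * pvTotal rest := by
  simp only [pvTotal, List.foldl_cons]
  rw [pvTotal_aux rest (1 * o.length), Nat.one_mul]
  rfl

theorem pvTotal_pos (os : List (List String)) (h : ∀ o ∈ os, o ≠ []) :
    0 < pvTotal os := by
  induction os with
  | nil => simp [pvTotal]
  | cons o rest ih =>
    rw [pvTotal_cons]
    have h2 : 0 < o.length := List.length_pos_iff.mpr (h o (by simp))
    exact Nat.mul_pos h2 (ih (fun x hx => h x (by simp [hx])))

-- a range over a product of counts splits into a double loop, leftmost slowest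
theorem range_mul_flatMap {α : Type} (a b : Nat) (f : Nat → α) :
    (List.range (a * b)).map f =
      (List.range a).flatMap (fun i => (List.range b).map (fun j => f (i * b + j))) := by
  induction a with
  | zero => simp
  | succ n ih =>
    have h1 : (n + 1) * b = n * b + b := by ring
    rw [h1, List.range_add, List.map_append, ih, List.range_succ, List.flatMap_append]
    simp [List.map_map, Function.comp_def, Nat.add_comm]

-- a flatMap over a list is a flatMap over its indices
theorem flatMap_eq_range {α : Type} (l : List String) (g : String → List α) :
    l.flatMap g = (List.range l.length).flatMap (fun i => g (l.getD i "")) := by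
  induction l with
  | nil => simp
  | cons x xs ih =>
    rw [List.flatMap_cons, List.length_cons, List.range_succ_eq_map, List.flatMap_cons, ih]
    simp [List.flatMap_map]

-- B's enumeration computes the cartesian product (all rows nonempty)
theorem enum_eq_product (os : List (List String)) (h : ∀ o ∈ os, o ≠ []) :
    (List.range (pvTotal os)).map (pvDecode os) = pvProduct os := by
  induction os with
  | nil => simp [pvTotal, pvDecode, pvProduct, List.range_succ]
  | cons o rest ih =>
    have ht : 0 < pvTotal rest := pvTotal_pos rest (fun x hx => h x (by simp [hx]))
    rw [pvTotal_cons, range_mul_flatMap, pvProduct,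
      flatMap_eq_range o (fun x => (pvProduct rest).map (fun p => x ++ p))]
    apply List.flatMap_congr
    intro i hi
    have hi' : i < o.length := List.mem_range.mp hi
    have hmap : (List.range (pvTotal rest)).map
          (fun j => pvDecode (o :: rest) (i * pvTotal rest + j)) =
        (List.range (pvTotal rest)).map (fun j => o.getD i "" ++ pvDecode rest j) := by
      apply List.map_congr_left
      intro j hj
      have hj' : j < pvTotal rest := List.mem_range.mp hj
      have hdiv : (i * pvTotal rest + j) / pvTotal rest = i := by
        rw [Nat.mul_comm, Nat.mul_add_div ht, Nat.div_eq_of_lt hj', Nat.add_zero]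
      have hmod : (i * pvTotal rest + j) % pvTotal rest = j := by
        rw [Nat.mul_comm, Nat.mul_add_mod, Nat.mod_eq_of_lt hj']
      simp [pvDecode, hdiv, hmod, List.getD_eq_getElem?_getD]
    rw [hmap, ← ih (fun x hx => h x (by simp [hx])), List.map_map]
    simp [Function.comp_def]

-- ===== VERDICT (by name: the statement is the Claim_ definition above) =====
theorem find_mapping_spec : Claim_equal_find_mapping := by
  intro s _
  unfold Spec_find_mapping find_mapping find_mapping_alt
  rcases h : s.toList with _ | ⟨c, cs⟩
  · simp
  · simp only [List.isEmpty_cons, Bool.false_eq_true, if_false, List.foldl_cons]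
    have h0 : (let temp0 := [String.ofList [c]]
        let temp := match mDict.get? c with | some v => temp0 ++ v | none => temp0
        if ([] : List String).length = 0 then temp
        else ([] : List String).foldl
          (fun a x => temp.foldl (fun acc2 y => acc2 ++ [x ++ y]) a) []) = pvOptions c := by
      simp only [List.length_nil]
      exact tempA_eq_options c
    rw [h0, foldA_eq_product cs (pvOptions c) (pvOptions_ne_nil c)]
    rw [enum_eq_product ((c :: cs).map pvOptions) (by
      intro o ho
      rcases List.mem_map.mp ho with ⟨d, _, rfl⟩
      exact pvOptions_ne_nil d)]
    simp [pvProduct]
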